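-- pv_equiv track=rewrite | github.com/lucasZyh/zotero_ai_obsidian_flow | pipeline.py | normalize_markdown_for_obsidian
-- ===== SOURCE A (Python) =====
-- from typing import Any, Dict, List, Optional, Tuple
--
-- def normalize_markdown_for_obsidian(md: str) -> str:
--     """
--     尽量修复 Obsidian 中常见的 Markdown 表格渲染问题：
--     1) 确保表格前后有空行
--     2) 避免“列表项 + 表格”导致表格不渲染（移除该列表标记）
--     """
--     lines = md.splitlines()
--     out: List[str] = []
--     i = 0
--     while i < len(lines):
--         line = lines[i]
--         stripped = line.strip()
--         is_table_line = stripped.startswith("|") and stripped.endswith("|")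
--
--         if not is_table_line:
--             out.append(line)
--             i += 1
--             continue
--
--         # 收集连续表格块
--         j = i
--         block: List[str] = []
--         while j < len(lines):
--             s = lines[j].strip()
--             if s.startswith("|") and s.endswith("|"):
--                 block.append(lines[j])
--                 j += 1
--             else:
--                 break
--
--         # 若上一行是列表项，且形如“ - xxx: ”，移除列表标记避免表格被吞
--         if out:
--             prev = out[-1].strip()
--             if (
--                 (prev.startswith("- ") or prev.startswith("* "))
--                 and (prev.endswith(":") or prev.endswith("："))
--             ):
--                 out[-1] = out[-1].replace("- ", "", 1).replace("* ", "", 1)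
--
--         # 表格前空行
--         if out and out[-1].strip():
--             out.append("")
--         out.extend(block)
--         # 表格后空行（如果后续还有非空内容）
--         if j < len(lines) and lines[j].strip():
--             out.append("")
--
--         i = j
--
--     # 压缩多余空行（最多保留一个空行）
--     compact: List[str] = []
--     blank = False
--     for ln in out:
--         cur_blank = not ln.strip()
--         if cur_blank and blank:
--             continue
--         compact.append(ln)
--         blank = cur_blank
--     return "\n".join(compact).strip()
-- ===== SOURCE B (Python) =====
-- def normalize_markdown_for_obsidian(md: str) -> str:
--     # Staged decomposition: (1) split lines into alternating runs of table /
--     # non-table lines, (2) emit runs applying boundary fixes per block,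
--     # (3) compact blank lines by pairwise comparison with the previous line.
--     lines = md.splitlines()
--
--     def is_table(line):
--         s = line.strip()
--         return s.startswith("|") and s.endswith("|")
--
--     runs = []
--     for line in lines:
--         k = is_table(line)
--         if runs and runs[-1][0] == k:
--             runs[-1][1].append(line)
--         else:
--             runs.append((k, [line]))
--
--     out = []
--     prev_table = False
--     for k, blk in runs:
--         if k:
--             if out:
--                 prev = out[-1].strip()
--                 if (prev.startswith("- ") or prev.startswith("* ")) and (
--                         prev.endswith(":") or prev.endswith("：")):
--                     out[-1] = out[-1].replace("- ", "", 1).replace("* ", "", 1)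
--                 if out[-1].strip():
--                     out.append("")
--         else:
--             if prev_table and blk[0].strip():
--                 out.append("")
--         out.extend(blk)
--         prev_table = k
--
--     compact = [ln for p, ln in zip([None] + out, out)
--                if ln.strip() or p is None or p.strip()]
--     return "\n".join(compact).strip()
-- ===== Notes on version B (the rewrite author's own statement) =====
-- stated objective: alternative
-- what changed: Replaced A's index-driven outer while loop with nested block-collecting while and flag-carrying blank compaction by a staged pipeline: group lines into alternating table/non-table runs, fold over the runs applying the boundary fixes per block, and compact blanks by zipping each line with its predecessor.
import Mathlib
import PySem

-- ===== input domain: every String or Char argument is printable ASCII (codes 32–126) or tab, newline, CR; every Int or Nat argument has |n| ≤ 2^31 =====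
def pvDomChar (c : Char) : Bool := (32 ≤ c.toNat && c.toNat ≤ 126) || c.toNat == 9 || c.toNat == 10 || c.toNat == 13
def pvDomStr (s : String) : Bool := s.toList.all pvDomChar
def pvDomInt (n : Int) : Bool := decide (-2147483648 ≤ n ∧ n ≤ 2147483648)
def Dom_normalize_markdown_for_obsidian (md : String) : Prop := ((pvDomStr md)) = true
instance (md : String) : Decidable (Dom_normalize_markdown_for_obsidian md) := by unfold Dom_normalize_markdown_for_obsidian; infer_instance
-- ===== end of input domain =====

-- B restructures A: instead of an index-driven outer while with a nested
-- block-collecting while plus a flag-carrying compaction loop, B first groups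
-- the lines into alternating table/non-table runs, then emits the runs with a
-- fold applying the boundary fixes per block, and compacts blank lines by a
-- pairwise zip with the previous line.  Same output, same cost class.

-- ===== PORT A =====

def isTableLine (line : String) : Bool :=
  let s := PySem.Str.strip line
  PySem.Str.startswith s "|" && PySem.Str.endswith s "|"

-- hand port of Python's str.replace(old, new, 1) (replace first occurrence);
-- exact for every old ≠ [] (both sources only call it with "- " and "* ")
def replaceOnce : List Char → List Char → List Char → List Char
  | [], old, new => if old = [] then new else []
  | c :: rest, old, new =>
    if old.isPrefixOf (c :: rest) then new ++ (c :: rest).drop old.length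
    else c :: replaceOnce rest old new

-- A's "remove list marker before a table" fix on out[-1]
def fixPrev (out : List String) : List String :=
  match out.getLast? with
  | none => out
  | some last =>
    let prev := PySem.Str.strip last
    if (PySem.Str.startswith prev "- " || PySem.Str.startswith prev "* ")
        && (PySem.Str.endswith prev ":" || PySem.Str.endswith prev "：") then
      out.dropLast ++ [String.ofList (replaceOnce (replaceOnce last.toList "- ".toList []) "* ".toList [])]
    else out

-- A's pre-table treatment: fix marker, then blank line if last line non-blank
def preTable (out : List String) : List String :=
  let o := fixPrev out
  match o.getLast? with
  | none => o
  | some l => if PySem.Str.strip l ≠ "" then o ++ [""] else o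

-- A's blank after the block: `if j < len(lines) and lines[j].strip()`
def tailBlank : List String → List String
  | [] => []
  | l :: _ => if PySem.Str.strip l ≠ "" then [""] else []

-- A's inner while loop: collect the consecutive table block, return (block, rest)
def collectBlock : List String → List String × List String
  | [] => ([], [])
  | l :: rest =>
    if isTableLine l then
      let p := collectBlock rest
      (l :: p.1, p.2)
    else ([], l :: rest)

theorem collectBlock_snd_length_le : ∀ ls : List String, (collectBlock ls).2.length ≤ ls.length := by
  intro ls
  induction ls with
  | nil => simp [collectBlock]
  | cons l rest ih =>
    simp only [collectBlock]
    split
    · exact Nat.le_succ_of_le ih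
    · simp

-- A's outer while loop over the line index
def loopA : List String → List String → List String
  | [], out => out
  | line :: rest, out =>
    if _h : isTableLine line = true then
      let p := collectBlock rest
      loopA p.2 (preTable out ++ (line :: p.1) ++ tailBlank p.2)
    else
      loopA rest (out ++ [line])
termination_by ls _ => ls.length
decreasing_by
  · exact Nat.lt_succ_of_le (collectBlock_snd_length_le rest)
  · simp

-- A's blank-compaction pass (accumulator + `blank` flag), then join + strip
def compactStep (acc : List String × Bool) (ln : String) : List String × Bool :=
  let cur := PySem.Str.strip ln == ""
  if cur && acc.2 then acc else (acc.1 ++ [ln], cur)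

def normalize_markdown_for_obsidian (md : String) : String :=
  PySem.Str.strip (PySem.Str.join "\n"
    ((loopA (PySem.Str.splitlines md) []).foldl compactStep ([], false)).1)

-- ===== PORT B =====

-- Source B's local `is_table`
def isTab (line : String) : Bool :=
  PySem.Str.startswith (PySem.Str.strip line) "|" && PySem.Str.endswith (PySem.Str.strip line) "|"

-- hand port of str.replace(old, new, 1), exact for old ≠ [] (only "- ", "* " used)
def replFirst (old new : List Char) : List Char → List Char
  | [] => if old.isPrefixOf [] then new else []
  | c :: cs =>
    if old.isPrefixOf (c :: cs) then new ++ (c :: cs).drop old.length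
    else c :: replFirst old new cs

-- Source B stage 1: group the lines into runs of equal table-ness
def addRun (runs : List (Bool × List String)) (k : Bool) (line : String) : List (Bool × List String) :=
  match runs.getLast? with
  | some r => if r.1 == k then runs.dropLast ++ [(r.1, r.2 ++ [line])] else runs ++ [(k, [line])]
  | none => runs ++ [(k, [line])]

def runsOf (lines : List String) : List (Bool × List String) :=
  lines.foldl (fun rs l => addRun rs (isTab l) l) []

-- Source B stage 2, table case: fix a trailing list marker, ensure blank, emit block
def emitTable (out blk : List String) : List String :=
  match out.getLast? with
  | none => out ++ blk
  | some last =>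
    let prev := PySem.Str.strip last
    let o :=
      if (PySem.Str.startswith prev "- " || PySem.Str.startswith prev "* ")
          && (PySem.Str.endswith prev ":" || PySem.Str.endswith prev "：") then
        out.dropLast ++ [String.ofList (replFirst "* ".toList [] (replFirst "- ".toList [] last.toList))]
      else out
    (if PySem.Str.strip (o.getLastD "") == "" then o else o ++ [""]) ++ blk

-- Source B stage 2: one fold over the runs carrying (out, prev_table)
def emitStep (st : List String × Bool) (r : Bool × List String) : List String × Bool :=
  if r.1 then (emitTable st.1 r.2, true)
  else ((if st.2 && (PySem.Str.strip (r.2.headD "") != "") then st.1 ++ [""] else st.1) ++ r.2, false)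

-- Source B stage 3: blank compaction as a zip with the previous line
def compactB (out : List String) : List String :=
  (List.zip (none :: out.map some) out).filterMap
    (fun pl =>
      if (PySem.Str.strip pl.2 != "")
          || (match pl.1 with | none => true | some q => PySem.Str.strip q != "") then
        some pl.2
      else none)

def normalize_markdown_for_obsidian_alt (md : String) : String :=
  PySem.Str.strip (PySem.Str.join "\n"
    (compactB ((runsOf (PySem.Str.splitlines md)).foldl emitStep ([], false)).1))

-- ===== PRECONDITION & SPEC =====
def Spec_normalize_markdown_for_obsidian (md : String) (out : String) : Prop := out = normalize_markdown_for_obsidian_alt md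
instance (md : String) (out : String) : Decidable (Spec_normalize_markdown_for_obsidian md out) := by unfold Spec_normalize_markdown_for_obsidian; infer_instance

-- ===== CLAIM (what is proved, stated in full; the proofs are below) =====
def Claim_equal_normalize_markdown_for_obsidian : Prop := ∀ (md : String), Dom_normalize_markdown_for_obsidian md → Spec_normalize_markdown_for_obsidian md (normalize_markdown_for_obsidian md)

-- ===== LEMMAS AND PROOFS =====

theorem isTab_eq : isTab = isTableLine := by
  funext l; simp [isTab, isTableLine]

theorem replFirst_eq (old new : List Char) : ∀ s, replFirst old new s = replaceOnce s old new := by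
  intro s
  induction s with
  | nil => simp [replFirst, replaceOnce]
  | cons c cs ih => simp only [replFirst, replaceOnce]; rw [ih]

-- reference form of the alternating-run decomposition (proof-side only)
def runsSpec : List String → List (Bool × List String)
  | [] => []
  | l :: ls =>
    (isTab l, l :: ls.takeWhile (fun x => isTab x == isTab l)) ::
      runsSpec (ls.dropWhile (fun x => isTab x == isTab l))
termination_by ls => ls.length
decreasing_by exact Nat.lt_succ_of_le (List.length_dropWhile_le _ _)

theorem foldl_addRun (ls : List String) : ∀ (rs : List (Bool × List String)) (k : Bool) (blk : List String),
    List.foldl (fun rs l => addRun rs (isTab l) l) (rs ++ [(k, blk)]) ls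
      = rs ++ (k, blk ++ ls.takeWhile (fun x => isTab x == k)) ::
          runsSpec (ls.dropWhile (fun x => isTab x == k)) := by
  induction ls with
  | nil => intro rs k blk; simp [runsSpec]
  | cons l ls' ih =>
    intro rs k blk
    simp only [List.foldl_cons]
    by_cases h : isTab l = k
    · have hbeq : (isTab l == k) = true := by simp [h]
      have hstep : addRun (rs ++ [(k, blk)]) (isTab l) l = rs ++ [(k, blk ++ [l])] := by
        simp [addRun, h]
      rw [hstep, ih rs k (blk ++ [l])]
      simp [hbeq]
    · have hbeq : (isTab l == k) = false := by simp [h]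
      have hstep : addRun (rs ++ [(k, blk)]) (isTab l) l
          = (rs ++ [(k, blk)]) ++ [(isTab l, [l])] := by
        simp [addRun, Ne.symm h]
      rw [hstep, ih (rs ++ [(k, blk)]) (isTab l) [l]]
      conv_rhs => rw [runsSpec.eq_def]
      simp [hbeq]

theorem runsOf_eq : ∀ ls, runsOf ls = runsSpec ls := by
  intro ls
  cases ls with
  | nil => simp [runsOf, runsSpec]
  | cons l ls' =>
    unfold runsOf
    have hstep : addRun [] (isTab l) l = [] ++ [(isTab l, [l])] := by simp [addRun]
    simp only [List.foldl_cons, hstep]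
    rw [foldl_addRun ls' [] (isTab l) [l]]
    conv_rhs => rw [runsSpec.eq_def]
    simp

theorem emitTable_eq (out blk : List String) : emitTable out blk = preTable out ++ blk := by
  have hrepl : ∀ t : String,
      String.ofList (replFirst "* ".toList [] (replFirst "- ".toList [] t.toList))
        = String.ofList (replaceOnce (replaceOnce t.toList "- ".toList []) "* ".toList []) := by
    intro t; rw [replFirst_eq, replFirst_eq]
  cases hout : out.getLast? with
  | none => simp [emitTable, preTable, fixPrev, hout]
  | some last =>
    simp only [emitTable, preTable, fixPrev, hout, hrepl]
    by_cases hc : ((PySem.Str.startswith (PySem.Str.strip last) "- "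
          || PySem.Str.startswith (PySem.Str.strip last) "* ")
        && (PySem.Str.endswith (PySem.Str.strip last) ":"
          || PySem.Str.endswith (PySem.Str.strip last) "：")) = true
    · simp only [hc, if_true]
      simp only [List.getLastD_eq_getLast?, List.getLast?_concat, Option.getD_some]
      simp
    · simp only [Bool.not_eq_true] at hc
      simp only [hc, Bool.false_eq_true, if_false]
      simp only [List.getLastD_eq_getLast?, hout, Option.getD_some]
      by_cases hb : PySem.Str.strip last = ""
      · simp [hb]
      · simp [hb]

theorem loopA_nontable : ∀ (tw : List String), (∀ l ∈ tw, isTableLine l = false) →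
    ∀ rest out, loopA (tw ++ rest) out = loopA rest (out ++ tw) := by
  intro tw
  induction tw with
  | nil => intro _ rest out; simp
  | cons l tl ih =>
    intro h rest out
    have hl : isTableLine l = false := h l (by simp)
    rw [List.cons_append, loopA]
    simp only [hl, Bool.false_eq_true, dite_false]
    rw [ih (fun x hx => h x (by simp [hx])) rest (out ++ [l])]
    simp

theorem dropWhile_head_false {p : String → Bool} : ∀ (ls : List String) l rest,
    ls.dropWhile p = l :: rest → p l = false := by
  intro ls
  induction ls with
  | nil => intro l rest h; simp [List.dropWhile] at h
  | cons x xs ih =>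
    intro l rest h
    by_cases hx : p x = true
    · exact ih l rest (by simpa [List.dropWhile, hx] using h)
    · rw [List.dropWhile_cons_of_neg hx] at h
      cases h; simpa using hx

theorem foldl_emit_true (rest' : List String)
    (h : ∀ l rest'', rest' = l :: rest'' → isTableLine l = false) (o : List String) :
    ((runsSpec rest').foldl emitStep (o, true)).1
      = ((runsSpec rest').foldl emitStep (o ++ tailBlank rest', false)).1 := by
  cases rest' with
  | nil => simp [runsSpec, tailBlank]
  | cons l ls =>
    have hl : isTableLine l = false := h l ls rfl
    have hl' : isTab l = false := by rw [isTab_eq]; exact hl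
    conv_lhs => rw [runsSpec.eq_def]
    conv_rhs => rw [runsSpec.eq_def]
    simp only [hl', List.foldl_cons]
    have hstate : emitStep (o, true) (false, l :: List.takeWhile (fun x => isTab x == false) ls)
        = emitStep (o ++ tailBlank (l :: ls), false) (false, l :: List.takeWhile (fun x => isTab x == false) ls) := by
      by_cases hb : PySem.Str.strip l = ""
      · simp [emitStep, tailBlank, hb]
      · simp [emitStep, tailBlank, hb]
    rw [hstate]

theorem collectBlock_eq : ∀ ls, collectBlock ls = (ls.takeWhile isTableLine, ls.dropWhile isTableLine) := by
  intro ls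
  induction ls with
  | nil => simp [collectBlock]
  | cons l rest ih =>
    by_cases h : isTableLine l = true <;>
      simp [collectBlock, h, List.takeWhile, List.dropWhile, ih]

theorem loopA_eq_emit : ∀ (n : ℕ) (ls : List String), ls.length ≤ n →
    ∀ out, loopA ls out = ((runsSpec ls).foldl emitStep (out, false)).1 := by
  intro n
  induction n with
  | zero =>
    intro ls hls out
    have : ls = [] := List.length_eq_zero_iff.mp (Nat.le_zero.mp hls)
    subst this
    rw [loopA]; simp [runsSpec]
  | succ n ih =>
    intro ls hls out
    match ls with
    | [] => rw [loopA]; simp [runsSpec]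
    | l :: rest =>
      have hrest : rest.length ≤ n := Nat.succ_le_succ_iff.mp hls
      by_cases ht : isTableLine l = true
      · have ht' : isTab l = true := by rw [isTab_eq]; exact ht
        have hpred : (fun x => isTab x == true) = isTableLine := by
          funext x; rw [isTab_eq]; simp
        rw [loopA]
        simp only [ht, dite_true]
        conv_rhs => rw [runsSpec.eq_def]
        simp only [ht', hpred, List.foldl_cons]
        simp only [collectBlock_eq]
        have hes : emitStep (out, false) (true, l :: List.takeWhile isTableLine rest)
            = (preTable out ++ (l :: List.takeWhile isTableLine rest), true) := by
          simp [emitStep, emitTable_eq]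
        rw [hes]
        have hhead : ∀ x rest'', rest.dropWhile isTableLine = x :: rest'' → isTableLine x = false :=
          fun x rest'' hx => dropWhile_head_false rest x rest'' hx
        rw [foldl_emit_true (rest.dropWhile isTableLine) hhead]
        rw [← ih (rest.dropWhile isTableLine)
              (le_trans (List.length_dropWhile_le _ _) hrest)]
      · have ht' : isTab l = false := by rw [isTab_eq]; simpa using ht
        have hpred : (fun x => isTab x == false) = (fun x => !isTableLine x) := by
          funext x; rw [isTab_eq]; simp
        rw [loopA]
        simp only [ht]
        conv_rhs => rw [runsSpec.eq_def]
        simp only [ht', hpred, List.foldl_cons]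
        have hes : emitStep (out, false) (false, l :: List.takeWhile (fun x => !isTableLine x) rest)
            = (out ++ (l :: List.takeWhile (fun x => !isTableLine x) rest), false) := by
          simp [emitStep]
        rw [hes]
        have hsplit : rest = rest.takeWhile (fun x => !isTableLine x)
            ++ rest.dropWhile (fun x => !isTableLine x) :=
          (List.takeWhile_append_dropWhile).symm
        conv_lhs => rw [hsplit]
        rw [loopA_nontable (rest.takeWhile (fun x => !isTableLine x))
              (by intro x hx
                  have := List.mem_takeWhile_imp hx
                  simpa using this)
              _ (out ++ [l])]
        rw [ih (rest.dropWhile (fun x => !isTableLine x))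
              (le_trans (List.length_dropWhile_le _ _) hrest)]
        simp

-- reference form of blank compaction (proof-side only)
def compactGen : Option String → List String → List String
  | _, [] => []
  | prev, l :: ls =>
    (if (PySem.Str.strip l != "")
        || (match prev with | none => true | some q => PySem.Str.strip q != "") then [l] else [])
      ++ compactGen (some l) ls

theorem compactB_eq_gen : ∀ (out : List String) (prev : Option String),
    (List.zip (prev :: out.map some) out).filterMap
      (fun pl =>
        if (PySem.Str.strip pl.2 != "")
            || (match pl.1 with | none => true | some q => PySem.Str.strip q != "") then
          some pl.2
        else none) = compactGen prev out := by
  intro out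
  induction out with
  | nil => intro prev; simp [compactGen]
  | cons l ls ih =>
    intro prev
    have hih := ih (some l)
    simp only [List.map_cons, List.zip_cons_cons, List.filterMap_cons, compactGen]
    by_cases hc : (PySem.Str.strip l != ""
        || (match prev with | none => true | some q => PySem.Str.strip q != "")) = true
    · simp only [hc, if_true, hih]; simp
    · simp only [if_neg hc, hih]
      simp

theorem foldl_compactStep : ∀ (out acc : List String) (prev : Option String),
    (out.foldl compactStep (acc, match prev with | none => false | some p => PySem.Str.strip p == "")).1
      = acc ++ compactGen prev out := by
  intro out
  induction out with
  | nil => intro acc prev; simp [compactGen]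
  | cons l ls ih =>
    intro acc prev
    simp only [List.foldl_cons, compactStep, compactGen]
    by_cases hl : PySem.Str.strip l = ""
    · cases prev with
      | none =>
        simp only [hl]
        have := ih (acc ++ [l]) (some l)
        simp [hl] at this
        simp [this]
      | some p =>
        by_cases hp : PySem.Str.strip p = ""
        · -- skip: cur && blank; state unchanged, flag stays true = strip l == ""
          simp only [hl, hp]
          have := ih acc (some l)
          simp [hl] at this
          simp [this]
        · simp only [hl]
          have := ih (acc ++ [l]) (some l)
          simp [hl] at this
          simp [hp, this]
    · have := ih (acc ++ [l]) (some l)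
      have hb : (PySem.Str.strip l == "") = false := by simp [hl]
      simp only [hb] at this ⊢
      simp at this
      cases prev with
      | none => simp [this]
      | some p => simp [hl, this]

theorem foldl_compactStep_none (out : List String) :
    (out.foldl compactStep ([], false)).1 = compactGen none out := by
  simpa using foldl_compactStep out [] none

theorem compactB_eq (out : List String) : compactB out = compactGen none out := by
  unfold compactB; exact compactB_eq_gen out none

-- ===== VERDICT (by name: the statement is the Claim_ definition above) =====
theorem normalize_markdown_for_obsidian_spec : Claim_equal_normalize_markdown_for_obsidian := by
  intro md _
  unfold Spec_normalize_markdown_for_obsidian normalize_markdown_for_obsidian normalize_markdown_for_obsidian_alt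
  rw [runsOf_eq, ← loopA_eq_emit (PySem.Str.splitlines md).length _ le_rfl]
  rw [compactB_eq, foldl_compactStep_none]
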